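-- pv_equiv track=rewrite | github.com/dparygin/py100_1 | 03.py | matrix_foll
-- ===== SOURCE A (Python) =====
-- def matrix_foll(n):
--     n = int(n)
--     p = [[0 for _ in range(n)] for _ in range(n)]
--     sum_x_y = 0
--     for x in range(n):
--         for y in range(n):
--             p[y][-y-1] = 1
--             sum_x_y = x + y
--             if sum_x_y < n - 1:
--                 p[x][y] = 0
--             else:
--                 p[x][y] = 2
--     return p
-- ===== SOURCE B (Python) =====
-- def matrix_foll(n):
--     n = int(n)
--     return [[0] * (n - 1 - i) + [1] + [2] * i for i in range(n)]
-- ===== Notes on version B (the rewrite author's own statement) =====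
-- stated objective: simpler
-- what changed: Replaces the nested per-cell loop with repeated anti-diagonal overwrites by direct run-length row construction [0]*(n-1-i)+[1]+[2]*i per row.
-- intended difference: For n == 1 A returns [[2]] because the final pass's 2-write lands after the anti-diagonal 1-write in the single cell; B returns [[1]], keeping the anti-diagonal 1 as on every other n. — e.g. on matrix_foll(1): A returns [[2]], B returns [[1]]
import Mathlib
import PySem

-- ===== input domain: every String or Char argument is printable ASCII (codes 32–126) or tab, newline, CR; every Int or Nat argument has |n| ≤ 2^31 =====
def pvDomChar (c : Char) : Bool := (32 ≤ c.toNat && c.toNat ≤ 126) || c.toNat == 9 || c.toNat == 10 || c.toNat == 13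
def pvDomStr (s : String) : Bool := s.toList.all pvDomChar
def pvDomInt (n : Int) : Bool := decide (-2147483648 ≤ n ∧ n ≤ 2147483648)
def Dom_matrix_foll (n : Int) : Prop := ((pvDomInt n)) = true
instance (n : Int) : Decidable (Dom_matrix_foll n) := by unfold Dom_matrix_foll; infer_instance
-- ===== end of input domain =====

-- B builds each row directly as [0]*(n-1-i)+[1]+[2]*i instead of A's per-cell loop with
-- repeated anti-diagonal overwrites (objective: simpler); A and B differ only at n = 1 (see D_).

-- ===== PORT A =====
-- Python in-place assignment xs[i] = v; exact for in-range i (every write in matrix_foll is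
-- in range); Lean's List.set is a no-op out of range where Python would raise.
def pySet {α : Type} (xs : List α) (i : Int) (v : α) : List α :=
  if i < 0 then xs.set (xs.length + i).toNat v else xs.set i.toNat v

-- p[i][j] = v (reads row i with pyGet?, then writes; exact for in-range indices)
def setMat (p : List (List Int)) (i j : Int) (v : Int) : List (List Int) :=
  match PySem.List.pyGet? p i with
  | some row => pySet p i (pySet row j v)
  | none => p

def matrix_foll (n : Int) : List (List Int) :=
  let p0 := (PySem.List.pyRange 0 n 1).map (fun _ => (PySem.List.pyRange 0 n 1).map (fun _ => (0 : Int)))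
  (PySem.List.pyRange 0 n 1).foldl (fun p x =>
    (PySem.List.pyRange 0 n 1).foldl (fun p y =>
      let p := setMat p y (-y - 1) 1
      if x + y < n - 1 then setMat p x y 0 else setMat p x y 2) p) p0

-- ===== PORT B =====
def matrix_foll_alt (n : Int) : List (List Int) :=
  (PySem.List.pyRange 0 n 1).map (fun i =>
    List.replicate (n - 1 - i).toNat (0 : Int) ++ [1] ++ List.replicate i.toNat 2)

-- ===== PRECONDITION & SPEC =====
-- At n = 1 A returns [[2]] (the single final 2-write lands after the anti-diagonal 1-write);
-- B returns [[1]], keeping the anti-diagonal 1 exactly as on every other n.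
def D_matrix_foll (n : Int) : Prop := n = 1
instance (n : Int) : Decidable (D_matrix_foll n) := by unfold D_matrix_foll; infer_instance

def Spec_matrix_foll (n : Int) (out : List (List Int)) : Prop := ¬ D_matrix_foll n → out = matrix_foll_alt n
instance (n : Int) (out : List (List Int)) : Decidable (Spec_matrix_foll n out) := by unfold Spec_matrix_foll; infer_instance

def pvDiffWitness_matrix_foll : Int := 1
def pvDiffWitnessOut_matrix_foll : (List (List Int)) × (List (List Int)) := ([[2]], [[1]])

-- ===== CLAIM (what is proved, stated in full; the proofs are below) =====
def Claim_unchanged_matrix_foll : Prop := ∀ (n : Int), Dom_matrix_foll n → Spec_matrix_foll n (matrix_foll n)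
def Claim_changed_matrix_foll : Prop := Dom_matrix_foll (pvDiffWitness_matrix_foll) ∧ D_matrix_foll (pvDiffWitness_matrix_foll) ∧ matrix_foll (pvDiffWitness_matrix_foll) = pvDiffWitnessOut_matrix_foll.1 ∧ matrix_foll_alt (pvDiffWitness_matrix_foll) = pvDiffWitnessOut_matrix_foll.2 ∧ pvDiffWitnessOut_matrix_foll.1 ≠ pvDiffWitnessOut_matrix_foll.2
def Claim_exact_matrix_foll : Prop := ∀ (n : Int), Dom_matrix_foll n → D_matrix_foll n → matrix_foll n ≠ matrix_foll_alt n

-- ===== LEMMAS AND PROOFS =====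

-- an m×m matrix given pointwise by f
def Mmat (m : Nat) (f : Nat → Nat → Int) : List (List Int) :=
  (List.range m).map (fun i => (List.range m).map (fun j => f i j))

-- pointwise effect of one inner-loop iteration (y) of outer iteration x
def istep (m x : Nat) (f : Nat → Nat → Int) (y : Nat) : Nat → Nat → Int :=
  fun r j => if r = x ∧ j = y then (if x + y + 1 < m then 0 else 2)
             else if r = y ∧ j = m - 1 - y then 1 else f r j

-- state after x complete outer iterations
def valF (m x r j : Nat) : Int :=
  if r < x then
    (if j + r + 1 = m then (if r + 1 = x ∧ 2 * r + 1 ≤ m then 2 else 1)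
     else if r + j + 1 < m then 0 else if j < m then 2 else 0)
  else if j + r + 1 = m ∧ 0 < x then 1 else 0

-- state after y inner iterations of outer iteration x (starting from valF m x)
def valG (m x y r j : Nat) : Int :=
  if r = x then
    (if j + x + 1 = m then
       (if j < y ∧ x ≤ j then 2 else if x < y then 1 else if j < y then 2 else valF m x x j)
     else if j < y then (if x + j + 1 < m then 0 else 2) else valF m x x j)
  else if j + r + 1 = m ∧ r < y then 1 else valF m x r j

-- B's cell value
def valB (m i j : Nat) : Int := if j + i + 1 = m then 1 else if i + j + 1 < m then 0 else 2

theorem set_map_range {α : Type} (m j : Nat) (hj : j < m) (g : Nat → α) (v : α) :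
    ((List.range m).map g).set j v = (List.range m).map (fun t => if t = j then v else g t) := by
  apply List.ext_getElem
  · simp
  · intro k h1 h2
    simp at h1
    by_cases hk : k = j
    · subst hk; simp
    · simp [hk, Ne.symm hk]

theorem pyGet?_Mmat (m : Nat) (f : Nat → Nat → Int) (i : Nat) (hi : i < m) :
    PySem.List.pyGet? (Mmat m f) (i : Int) = some ((List.range m).map (fun j => f i j)) := by
  rw [PySem.List.pyGet?_natCast]
  simp [Mmat, hi]

theorem setMat_M (m : Nat) (f : Nat → Nat → Int) (i j : Nat) (hi : i < m) (hj : j < m) (v : Int) :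
    setMat (Mmat m f) (i : Int) (j : Int) v
      = Mmat m (fun r c => if r = i ∧ c = j then v else f r c) := by
  rw [setMat, pyGet?_Mmat m f i hi]
  unfold pySet
  simp only [Int.toNat_natCast, if_neg (by omega : ¬ (i:Int) < 0),
    if_neg (by omega : ¬ (j:Int) < 0)]
  rw [set_map_range m j hj]
  unfold Mmat
  rw [set_map_range m i hi]
  apply List.map_congr_left
  intro r _
  by_cases hr : r = i
  · subst hr
    rw [if_pos rfl]
    apply List.map_congr_left
    intro c _
    by_cases hc : c = j <;> simp [hc]
  · rw [if_neg hr]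
    simp [hr]

theorem setMat_M_neg (m : Nat) (f : Nat → Nat → Int) (i y : Nat) (hi : i < m) (hy : y < m) (v : Int) :
    setMat (Mmat m f) (i : Int) (-(y : Int) - 1) v
      = Mmat m (fun r c => if r = i ∧ c = m - 1 - y then v else f r c) := by
  rw [setMat, pyGet?_Mmat m f i hi]
  unfold pySet
  simp only [if_pos (by omega : (-(y:Int) - 1) < 0), if_neg (by omega : ¬ (i:Int) < 0),
    Int.toNat_natCast, List.length_map, List.length_range]
  have hidx : ((m : Int) + (-(y : Int) - 1)).toNat = m - 1 - y := by omega
  rw [hidx, set_map_range m (m - 1 - y) (by omega)]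
  unfold Mmat
  rw [set_map_range m i hi]
  apply List.map_congr_left
  intro r _
  by_cases hr : r = i
  · subst hr
    rw [if_pos rfl]
    apply List.map_congr_left
    intro c _
    by_cases hc : c = m - 1 - y <;> simp [hc]
  · rw [if_neg hr]
    simp [hr]

theorem foldl_lift (m : Nat) (F : List (List Int) → Nat → List (List Int))
    (G : (Nat → Nat → Int) → Nat → (Nat → Nat → Int))
    (h : ∀ g y, y < m → F (Mmat m g) y = Mmat m (G g y)) :
    ∀ (l : List Nat) (g : Nat → Nat → Int), (∀ y ∈ l, y < m) →
      l.foldl F (Mmat m g) = Mmat m (l.foldl G g) := by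
  intro l
  induction l with
  | nil => intro g _; simp
  | cons a l ih =>
    intro g hl
    simp only [List.foldl_cons]
    rw [h g a (hl a (by simp))]
    exact ih (G g a) (fun y hy => hl y (by simp [hy]))

theorem body_step (m x y : Nat) (hx : x < m) (hy : y < m) (g : Nat → Nat → Int) :
    (let p := setMat (Mmat m g) (y : Int) (-(y : Int) - 1) 1;
     if (x : Int) + (y : Int) < (m : Int) - 1 then setMat p (x : Int) (y : Int) 0
     else setMat p (x : Int) (y : Int) 2) = Mmat m (istep m x g y) := by
  simp only
  rw [setMat_M_neg m g y y hy hy]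
  by_cases hc : (x : Int) + (y : Int) < (m : Int) - 1
  · rw [if_pos hc, setMat_M m _ x y hx hy]
    unfold Mmat istep
    apply List.map_congr_left; intro r _
    apply List.map_congr_left; intro c _
    have : x + y + 1 < m := by omega
    simp only [this, if_true]
  · rw [if_neg hc, setMat_M m _ x y hx hy]
    unfold Mmat istep
    apply List.map_congr_left; intro r _
    apply List.map_congr_left; intro c _
    have : ¬ (x + y + 1 < m) := by omega
    simp only [this, if_false]

theorem valG_zero (m x : Nat) : valG m x 0 = valF m x := by
  funext r j
  by_cases hr : r = x
  · subst hr; simp [valG]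
  · simp [valG, hr]

set_option maxHeartbeats 1600000 in
theorem valG_step (m x y : Nat) (hx : x < m) (hy : y < m) :
    istep m x (valG m x y) y = valG m x (y + 1) := by
  funext r j
  unfold istep valG valF
  split_ifs <;> omega

theorem inner_inv (m x : Nat) (hx : x < m) :
    ∀ y ≤ m, (List.range y).foldl (istep m x) (valF m x) = valG m x y := by
  intro y
  induction y with
  | zero => intro _; simp [valG_zero]
  | succ y ih =>
    intro hy
    rw [List.range_succ, List.foldl_append, ih (by omega), List.foldl_cons, List.foldl_nil,
      valG_step m x y hx (by omega)]

set_option maxHeartbeats 800000 in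
theorem valG_full (m x : Nat) (hx : x < m) : valG m x m = valF m (x + 1) := by
  funext r j
  unfold valG valF
  split_ifs <;> omega

theorem outer_inv (m : Nat) :
    ∀ x ≤ m, (List.range x).foldl (fun g x => (List.range m).foldl (istep m x) g) (fun _ _ => 0)
      = valF m x := by
  intro x
  induction x with
  | zero =>
    intro _
    funext r j
    simp [valF]
  | succ x ih =>
    intro hx
    rw [List.range_succ, List.foldl_append, ih (by omega), List.foldl_cons, List.foldl_nil,
      inner_inv m x (by omega) m le_rfl, valG_full m x (by omega)]

theorem body_step' (m x y : Nat) (hx : x < m) (hy : y < m) (g : Nat → Nat → Int) :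
    (if (x : Int) + (y : Int) < (m : Int) - 1
     then setMat (setMat (Mmat m g) (y : Int) (-(y : Int) - 1) 1) (x : Int) (y : Int) 0
     else setMat (setMat (Mmat m g) (y : Int) (-(y : Int) - 1) 1) (x : Int) (y : Int) 2)
      = Mmat m (istep m x g y) := by
  have h := body_step m x y hx hy g
  simpa using h

theorem matrix_foll_eq (n : Int) (hn : 0 < n) :
    matrix_foll n = Mmat n.toNat (valF n.toNat n.toNat) := by
  have hmn : ((n.toNat : Nat) : Int) = n := Int.toNat_of_nonneg (by omega)
  set m := n.toNat with hm
  unfold matrix_foll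
  rw [← hmn, PySem.List.pyRange_zero_nat]
  simp only [List.map_map, List.foldl_map]
  have hp0 : (List.range m).map ((fun _ => (List.range m).map ((fun _ => (0:Int)) ∘ (fun k : Nat => (k : Int)))) ∘ (fun k : Nat => (k : Int)))
      = Mmat m (fun _ _ => 0) := by
    unfold Mmat; simp [Function.comp_def]
  rw [hp0]
  rw [foldl_lift m _ (fun g x => (List.range m).foldl (istep m x) g)
    (by
      intro g x hxm
      exact foldl_lift m _ (istep m x)
        (fun g' y hym => body_step' m x y hxm hym g')
        (List.range m) g (by intro y hy; exact List.mem_range.mp hy))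
    (List.range m) (fun _ _ => 0) (by intro y hy; exact List.mem_range.mp hy)]
  rw [outer_inv m m le_rfl]

theorem row_eq (m i : Nat) (hi : i < m) :
    List.replicate (m - 1 - i) (0 : Int) ++ [1] ++ List.replicate i 2
      = (List.range m).map (fun j => valB m i j) := by
  apply List.ext_getElem
  · simp; omega
  · intro j h1 h2
    simp only [List.length_append, List.length_replicate, List.length_cons, List.length_nil] at h1
    simp only [List.getElem_map, List.getElem_range]
    unfold valB
    rcases Nat.lt_trichotomy j (m - 1 - i) with h | h | h
    · rw [List.getElem_append_left (by simp [List.length_append]; omega),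
        List.getElem_append_left (by simpa using h), List.getElem_replicate]
      have h3 : ¬ (j + i + 1 = m) := by omega
      have h4 : i + j + 1 < m := by omega
      simp [h3, h4]
    · subst h
      rw [List.getElem_append_left (by simp only [List.length_append, List.length_replicate, List.length_cons, List.length_nil]; omega),
        List.getElem_append_right (by simp only [List.length_replicate]; omega)]
      have h3 : m - 1 - i + i + 1 = m := by omega
      simp [h3]
    · rw [List.getElem_append_right (by simp only [List.length_append, List.length_replicate, List.length_cons, List.length_nil]; omega), List.getElem_replicate]
      have h3 : ¬ (j + i + 1 = m) := by omega
      have h4 : ¬ (i + j + 1 < m) := by omega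
      simp [h3, h4]

theorem alt_eq (n : Int) (hn : 0 < n) :
    matrix_foll_alt n = (List.range n.toNat).map (fun i => (List.range n.toNat).map (fun j => valB n.toNat i j)) := by
  have hmn : ((n.toNat : Nat) : Int) = n := Int.toNat_of_nonneg (by omega)
  set m := n.toNat with hm
  unfold matrix_foll_alt
  rw [← hmn, PySem.List.pyRange_zero_nat, List.map_map]
  apply List.map_congr_left
  intro i hi
  simp only [List.mem_range] at hi
  simp only [Function.comp]
  have h1 : ((m : Int) - 1 - (i : Int)).toNat = m - 1 - i := by omega
  have h2 : ((i : Nat) : Int).toNat = i := by omega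
  rw [h1, h2, row_eq m i hi]

theorem valF_final (m i j : Nat) (hm : 2 ≤ m) (hi : i < m) (hj : j < m) : valF m m i j = valB m i j := by
  unfold valF valB
  split_ifs <;> omega

-- ===== VERDICT (by name: the statement is the Claim_ definition above) =====
theorem matrix_foll_spec : Claim_unchanged_matrix_foll := by
  intro n _ hD
  unfold D_matrix_foll at hD
  by_cases hn : n ≤ 0
  · have h : PySem.List.pyRange 0 n 1 = [] := PySem.List.pyRange_one_eq_nil (by omega)
    simp [matrix_foll, matrix_foll_alt, h]
  · have hn' : 0 < n := by omega
    have hm2 : 2 ≤ n.toNat := by omega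
    rw [matrix_foll_eq n hn', alt_eq n hn']
    unfold Mmat
    apply List.map_congr_left
    intro i hi
    simp only [List.mem_range] at hi
    apply List.map_congr_left
    intro j hj
    simp only [List.mem_range] at hj
    exact valF_final n.toNat i j hm2 hi hj

theorem matrix_foll_changed : Claim_changed_matrix_foll := by
  unfold Claim_changed_matrix_foll; decide

theorem matrix_foll_tight : Claim_exact_matrix_foll := by
  intro n _ hD
  unfold D_matrix_foll at hD
  subst hD
  decide
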